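-- pv_equiv track=rewrite | github.com/youksimdeuk/stock_analyze | ko_restore.py | read_news
-- ===== SOURCE A (Python) =====
-- def read_news(all_vals):
--     news_items, investment_points = [], []
--     for row in all_vals[1:]:
--         title_desc = str(row[1]).strip() if len(row) > 1 else ''
--         if not title_desc:
--             break
--         lines = title_desc.split('\n', 1)
--         news_items.append({
--             'title':       lines[0].strip(),
--             'description': lines[1].strip() if len(lines) > 1 else '',
--             'pubDate':     str(row[0]).strip() if len(row) > 0 else '',
--             'link':        '',
--         })
--         point = str(row[3]).strip() if len(row) > 3 else ''
--         if point:
--             investment_points.append({'번호': len(investment_points) + 1, '투자포인트': point})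
--     return news_items, investment_points
-- ===== SOURCE B (Python) =====
-- def read_news(all_vals):
--     rows = all_vals[1:]
--
--     def title_desc(row):
--         return str(row[1]).strip() if len(row) > 1 else ''
--
--     def point(row):
--         return str(row[3]).strip() if len(row) > 3 else ''
--
--     # valid prefix: rows up to (excluding) the first empty title_desc
--     prefix = []
--     for row in rows:
--         if not title_desc(row):
--             break
--         prefix.append(row)
--
--     news_items = [
--         {
--             'title':       lines[0].strip(),
--             'description': lines[1].strip() if len(lines) > 1 else '',
--             'pubDate':     str(row[0]).strip() if len(row) > 0 else '',
--             'link':        '',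
--         }
--         for row in prefix
--         for lines in [title_desc(row).split('\n', 1)]
--     ]
--
--     investment_points = [
--         {'번호': i, '투자포인트': p}
--         for i, p in enumerate((p for p in map(point, prefix) if p), 1)
--     ]
--
--     return news_items, investment_points
-- ===== Notes on version B (the rewrite author's own statement) =====
-- stated objective: alternative
-- what changed: A's single fused loop with break and two interleaved accumulators is replaced by computing the valid prefix of rows first, then building news_items as one comprehension over that prefix and investment_points as a separate filter+enumerate pass.
import Mathlib
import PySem

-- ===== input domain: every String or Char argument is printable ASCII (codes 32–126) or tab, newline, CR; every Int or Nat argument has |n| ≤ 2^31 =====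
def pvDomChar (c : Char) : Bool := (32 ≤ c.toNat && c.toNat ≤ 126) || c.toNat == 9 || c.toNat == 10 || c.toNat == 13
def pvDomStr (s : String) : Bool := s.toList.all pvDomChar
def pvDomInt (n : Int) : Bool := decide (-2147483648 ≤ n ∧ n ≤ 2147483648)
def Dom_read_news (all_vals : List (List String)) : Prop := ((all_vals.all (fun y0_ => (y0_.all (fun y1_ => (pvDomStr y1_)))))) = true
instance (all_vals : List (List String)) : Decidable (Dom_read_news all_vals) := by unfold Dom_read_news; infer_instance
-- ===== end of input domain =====

-- B re-decomposes A's fused loop-with-break into a valid-prefix pass plus two shaped passes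
-- (map for news items, filter+enumerate for investment points); objective: alternative, same cost.
-- Note: the Python '번호' value is an int; per the dict[str,str] return convention it is ported as str(n).

-- ===== PORT A =====
-- shared sub-expressions of both Pythons: title_desc / point of one row, and the news-item dict
def pvTd (row : List String) : String :=
  if 1 < row.length then PySem.Str.strip (row.getD 1 "") else ""

def pvPt (row : List String) : String :=
  if 3 < row.length then PySem.Str.strip (row.getD 3 "") else ""

def pvItem (row : List String) : List (String × String) :=
  let lines := (PySem.Str.splitMax? (pvTd row) "\n" 1).getD []   -- some: sep "\n" ≠ ""
  [("title", PySem.Str.strip (lines.getD 0 "")),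
   ("description", if 1 < lines.length then PySem.Str.strip (lines.getD 1 "") else ""),
   ("pubDate", if 0 < row.length then PySem.Str.strip (row.getD 0 "") else ""),
   ("link", "")]

def pvPoint (n : Int) (p : String) : List (String × String) :=
  [("번호", PySem.Int.toStr n), ("투자포인트", p)]

-- A's for-loop with break, carrying both accumulators
def read_news_loop : List (List String) → List (List (String × String)) →
    List (List (String × String)) →
    (List (List (String × String))) × (List (List (String × String)))
  | [], ni, ip => (ni, ip)
  | row :: rest, ni, ip =>
    let td := pvTd row
    if td = "" then (ni, ip)                      -- break
    else
      let ni' := ni ++ [pvItem row]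
      let pt := pvPt row
      let ip' := if pt = "" then ip else ip ++ [pvPoint (ip.length + 1) pt]
      read_news_loop rest ni' ip'

def read_news (all_vals : List (List String)) :
    (List (List (String × String))) × (List (List (String × String))) :=
  read_news_loop (PySem.List.slice all_vals (some 1) none) [] []

-- ===== PORT B =====
-- Source B's prefix loop: rows up to (excluding) the first empty title_desc
def pvPrefix : List (List String) → List (List String)
  | [] => []
  | row :: rest => if pvTd row = "" then [] else row :: pvPrefix rest

def read_news_alt (all_vals : List (List String)) :
    (List (List (String × String))) × (List (List (String × String))) :=
  let pre := pvPrefix (PySem.List.slice all_vals (some 1) none)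
  let news_items := pre.map pvItem
  let investment_points :=
    (PySem.List.enumerate (((pre.map pvPt).filter (· ≠ ""))) 1).map
      (fun ip => pvPoint ip.1 ip.2)
  (news_items, investment_points)

-- ===== PRECONDITION & SPEC =====
def Spec_read_news (all_vals : List (List String)) (out : (List (List (String × String))) × (List (List (String × String)))) : Prop := out = read_news_alt all_vals
instance (all_vals : List (List String)) (out : (List (List (String × String))) × (List (List (String × String)))) : Decidable (Spec_read_news all_vals out) := by unfold Spec_read_news; infer_instance

-- ===== CLAIM (what is proved, stated in full; the proofs are below) =====
def Claim_equal_read_news : Prop := ∀ (all_vals : List (List String)), Dom_read_news all_vals → Spec_read_news all_vals (read_news all_vals)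

-- ===== LEMMAS AND PROOFS =====
-- Loop invariant: A's fused loop equals appending B's two shaped passes over the
-- remaining prefix, with point numbering continued from the accumulator's length.
theorem read_news_loop_eq (rest : List (List String))
    (ni ip : List (List (String × String))) :
    read_news_loop rest ni ip =
      (ni ++ (pvPrefix rest).map pvItem,
       ip ++ (PySem.List.enumerate (((pvPrefix rest).map pvPt).filter (· ≠ "")) (ip.length + 1)).map
         (fun p => pvPoint p.1 p.2)) := by
  induction rest generalizing ni ip with
  | nil => simp [read_news_loop, pvPrefix]
  | cons row rest ih =>
    by_cases htd : pvTd row = ""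
    · simp [read_news_loop, pvPrefix, htd]
    · by_cases hpt : pvPt row = ""
      · simp [read_news_loop, pvPrefix, htd, hpt, ih]
      · simp only [read_news_loop, pvPrefix, htd, hpt, if_neg, not_false_eq_true]
        rw [ih]
        simp [hpt, PySem.List.enumerate_cons, List.append_assoc, pvPoint]

-- ===== VERDICT (by name: the statement is the Claim_ definition above) =====
theorem read_news_spec : Claim_equal_read_news := by
  intro all_vals _
  unfold Spec_read_news read_news read_news_alt
  rw [read_news_loop_eq]
  simp
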